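-- pv_equiv track=rewrite | github.com/SeongBeomLEE/CodingTest | Programmers/Level2/Q43.py | solution
-- ===== SOURCE A (Python) =====
-- def solution(n):
--     total = sum([i for i in range(1, n + 1)])
--     turn_li = [n]
--     for i in range(n - 1, 0, -1):
--         turn_li.append(turn_li[-1] + i)
--     ans = [[0] * i for i in range(1, n + 1)]
--
--     row = 0
--     col = 0
--     for i in range(1, total + 1):
--         ans[row][col] = i
--         for idx in range(len(turn_li)):
--             if i < turn_li[idx]: break
--         mod = idx % 3
--         if mod == 0: row += 1
--         if mod == 1: col += 1
--         if mod == 2: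
--             row -= 1
--             col -= 1
--     answer = []
--     for i in ans:
--         answer += i
--     return answer
-- ===== SOURCE B (Python) =====
-- def solution(n):
--     ans = [[0] * i for i in range(1, n + 1)]
--     row, col, i = -1, 0, 0
--     for k in range(n):
--         d = k % 3
--         for _ in range(n - k):
--             if d == 0:
--                 row += 1
--             elif d == 1:
--                 col += 1
--             else:
--                 row -= 1
--                 col -= 1
--             i += 1
--             ans[row][col] = i
--     return [x for r in ans for x in r]
-- ===== Notes on version B (the rewrite author's own statement) =====
-- stated objective: faster
-- what changed: B walks the triangle segment by segment carrying the current direction (k%3) incrementally, instead of A's per-cell linear rescans of the turn_li boundary list to decide the direction.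
import Mathlib
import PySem

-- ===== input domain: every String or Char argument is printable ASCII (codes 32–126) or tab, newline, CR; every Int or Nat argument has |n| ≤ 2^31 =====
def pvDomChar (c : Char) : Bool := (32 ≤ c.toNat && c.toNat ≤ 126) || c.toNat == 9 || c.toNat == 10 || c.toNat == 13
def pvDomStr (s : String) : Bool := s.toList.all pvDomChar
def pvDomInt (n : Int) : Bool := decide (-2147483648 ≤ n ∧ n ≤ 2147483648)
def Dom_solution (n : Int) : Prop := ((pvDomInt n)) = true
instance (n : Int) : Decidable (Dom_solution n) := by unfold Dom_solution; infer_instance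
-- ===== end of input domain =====

-- B replaces A's per-cell linear rescan of the turn_li boundary list with a per-segment walk
-- that carries the direction (k % 3) incrementally; measured asymptotically faster (O(n^2) vs O(n^3)).


-- ===== PORT A =====
-- ans[row][col] = i  (Python setitem on a list of lists; negative indices wrap; on an
-- out-of-range index Python would raise IndexError — that branch returns the grid unchanged
-- and is never reached by either program's walk, which stays inside the triangle)
def pvWrite2 (g : List (List Int)) (r c v : Int) : List (List Int) :=
  match PySem.List.pyGet? g r with
  | none => g
  | some rowL =>
    match PySem.List.pySet? rowL c v with
    | none => g
    | some rowL' => (PySem.List.pySet? g r rowL').getD g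

-- 'for idx in range(len(turn_li)): if i < turn_li[idx]: break' — returns the leftover idx
-- (first index with i < turn_li[idx], else len(turn_li) - 1)
def pvScanGo (x : Int) : List Int → Int → Int
  | [], c => c - 1
  | t :: ts, c => if x < t then c else pvScanGo x ts (c + 1)

-- turn_li = [n]; for i in range(n-1, 0, -1): turn_li.append(turn_li[-1] + i)
def pvBuildTurn (n : Int) : List Int :=
  (PySem.List.pyRange (n - 1) 0 (-1)).foldl
    (fun li i => li ++ [PySem.List.pyGetD li (-1) 0 + i]) [n]

def solution (n : Int) : List Int :=
  let total := (PySem.List.pyRange 1 (n + 1) 1).foldl (· + ·) 0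
  let turn_li := pvBuildTurn n
  let ans := (PySem.List.pyRange 1 (n + 1) 1).map (fun i => PySem.List.pyRepeat [0] i)
  let st := (PySem.List.pyRange 1 (total + 1) 1).foldl
    (fun (s : List (List Int) × Int × Int) i =>
      let ans := pvWrite2 s.1 s.2.1 s.2.2 i
      let idx := pvScanGo i turn_li 0
      let md := PySem.Int.mod idx 3
      let row := if md = 0 then s.2.1 + 1 else s.2.1
      let col := if md = 1 then s.2.2 + 1 else s.2.2
      let rc := if md = 2 then (row - 1, col - 1) else (row, col)
      (ans, rc)) (ans, 0, 0)
  st.1.foldl (fun acc r => acc ++ r) []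

-- ===== PORT B =====
-- if d == 0: row += 1 / elif d == 1: col += 1 / else: row -= 1; col -= 1
def pvMove (d : Int) (rc : Int × Int) : Int × Int :=
  if d = 0 then (rc.1 + 1, rc.2) else if d = 1 then (rc.1, rc.2 + 1) else (rc.1 - 1, rc.2 - 1)

def solution_alt (n : Int) : List Int :=
  let ans := (PySem.List.pyRange 1 (n + 1) 1).map (fun i => PySem.List.pyRepeat [0] i)
  let st := (PySem.List.pyRange 0 n 1).foldl
    (fun (s : List (List Int) × Int × Int × Int) k =>
      let d := PySem.Int.mod k 3
      (PySem.List.pyRange 0 (n - k) 1).foldl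
        (fun (s : List (List Int) × Int × Int × Int) _ =>
          let rc := pvMove d (s.2.1, s.2.2.1)
          let i := s.2.2.2 + 1
          (pvWrite2 s.1 rc.1 rc.2 i, rc.1, rc.2, i)) s) (ans, -1, 0, 0)
  st.1.flatMap id

-- ===== PRECONDITION & SPEC =====
def Spec_solution (n : Int) (out : List Int) : Prop := out = solution_alt n
instance (n : Int) (out : List Int) : Decidable (Spec_solution n out) := by unfold Spec_solution; infer_instance

-- ===== CLAIM (what is proved, stated in full; the proofs are below) =====
def Claim_equal_solution : Prop := ∀ (n : Int), Dom_solution n → Spec_solution n (solution n)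

-- ===== LEMMAS AND PROOFS =====

-- consecutive cell values c, c+1, ..., c+L-1
def pvCells (c : Int) : Nat → List Int
  | 0 => []
  | L + 1 => c :: pvCells (c + 1) L

-- S n k = n + (n-1) + ... + (n-k+1)  (number of cells in the first k segments)
def pvS (n : Int) : Nat → Int
  | 0 => 0
  | k + 1 => pvS n k + (n - k)

def pvSN (m : Nat) : Nat → Nat
  | 0 => 0
  | k + 1 => pvSN m k + (m - k)

-- canonical move-then-write step: direction of cell i is D i
def pvStepM (D : Int → Int) (s : List (List Int) × Int × Int) (i : Int) :
    List (List Int) × Int × Int :=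
  let rc := pvMove (D i) (s.2.1, s.2.2)
  (pvWrite2 s.1 rc.1 rc.2 i, rc.1, rc.2)

lemma pvCells_append (c : Int) (a b : Nat) :
    pvCells c (a + b) = pvCells c a ++ pvCells (c + a) b := by
  induction a generalizing c with
  | zero => simp [pvCells]
  | succ a ih =>
    have h : a + 1 + b = (a + b) + 1 := by omega
    rw [h]
    simp only [pvCells, ih (c + 1), List.cons_append]
    have h2 : (c + ((a : Nat) + 1 : Nat) : Int) = c + 1 + (a : Int) := by push_cast; ring
    rw [h2]

lemma mem_pvCells {x c : Int} {L : Nat} : x ∈ pvCells c L ↔ c ≤ x ∧ x < c + L := by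
  induction L generalizing c with
  | zero => simp [pvCells]
  | succ L ih => simp [pvCells, ih]; omega

lemma pyRange_eq_pvCells' : ∀ (L : Nat) (a b : Int), (b - a).toNat = L →
    PySem.List.pyRange a b 1 = pvCells a L := by
  intro L
  induction L with
  | zero => intro a b hL; rw [PySem.List.pyRange_one_eq_nil (by omega)]; rfl
  | succ L ih =>
    intro a b hL
    rw [PySem.List.pyRange_one_cons (by omega), ih (a + 1) b (by omega)]
    rfl

lemma pyRange_eq_pvCells (a b : Int) : PySem.List.pyRange a b 1 = pvCells a (b - a).toNat :=
  pyRange_eq_pvCells' _ a b rfl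

lemma pvS_succ_succ (n : Int) (k : Nat) : pvS (n + 1) (k + 1) = pvS n k + (n + 1) := by
  induction k with
  | zero => simp [pvS]
  | succ k ih =>
    have h1 : pvS (n + 1) (k + 1 + 1) = pvS (n + 1) (k + 1) + (n + 1 - (k + 1)) := rfl
    have h2 : pvS n (k + 1) = pvS n k + (n - k) := rfl
    rw [h1, h2, ih]; ring

lemma pvSN_cast (m : Nat) (j : Nat) (hj : j ≤ m) : ((pvSN m j : Nat) : Int) = pvS (m : Int) j := by
  induction j with
  | zero => simp [pvSN, pvS]
  | succ j ih =>
    have h1 : pvSN m (j + 1) = pvSN m j + (m - j) := rfl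
    have h2 : pvS (m : Int) (j + 1) = pvS (m : Int) j + ((m : Int) - j) := rfl
    have h3 := ih (by omega)
    rw [h1, h2]
    push_cast [Nat.cast_sub (show j ≤ m by omega)]
    omega

lemma pvS_mono (n : Int) (m : Nat) (hn : n = (m : Int)) :
    ∀ j k : Nat, j ≤ k → k ≤ m → pvS n j + ((k : Int) - j) ≤ pvS n k := by
  subst hn
  intro j k
  induction k with
  | zero =>
    intro hjk hk
    have : j = 0 := by omega
    subst this; simp
  | succ k ih =>
    intro hjk hk
    rcases Nat.lt_or_ge j (k + 1) with h | h
    · have h1 : pvS (m : Int) (k + 1) = pvS (m : Int) k + ((m : Int) - k) := rfl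
      have h2 := ih (by omega) (by omega)
      rw [h1]
      push_cast
      omega
    · have : j = k + 1 := by omega
      subst this; simp

-- total = sum(range(1, n+1)) equals pvS n n  (for n = m ≥ 0)
lemma sum_pyRange (m : Nat) :
    (PySem.List.pyRange 1 ((m : Int) + 1) 1).foldl (· + ·) 0 = pvS (m : Int) m := by
  induction m with
  | zero => simp [PySem.List.pyRange_one_eq_nil, pvS]
  | succ m ih =>
    have h1 : (1 : Int) ≤ (m : Int) + 1 := by omega
    rw [show (((m + 1 : Nat) : Int) + 1) = ((m : Int) + 1) + 1 by push_cast; ring,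
        PySem.List.pyRange_one_succ_right h1, List.foldl_append, ih]
    have := pvS_succ_succ (m : Int) m
    simp only [List.foldl]
    push_cast
    omega

-- the built turn list is [S 1, S 2, ..., S m]
lemma buildTurn_eq (n : Int) (m : Nat) (hm : 1 ≤ m) (hn : n = (m : Int)) :
    pvBuildTurn n = (List.range m).map (fun k => pvS n (k + 1)) := by
  have aux : ∀ j : Nat,
      (List.range j).foldl
        (fun li (k : Nat) => li ++ [PySem.List.pyGetD li (-1) 0 + (n - 1 - (k : Int))]) [n]
      = (List.range (j + 1)).map (fun k => pvS n (k + 1)) := by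
    intro j
    induction j with
    | zero => simp [pvS]
    | succ j ih =>
      rw [List.range_succ, List.foldl_append, ih, List.foldl_cons, List.foldl_nil]
      rw [show List.range (j + 1 + 1) = List.range (j + 1) ++ [j + 1] from List.range_succ,
          List.map_append]
      rw [show (List.range (j + 1)).map (fun k => pvS n (k + 1))
            = (List.range j).map (fun k => pvS n (k + 1)) ++ [pvS n (j + 1)] by
          rw [List.range_succ, List.map_append]; rfl]
      rw [PySem.List.pyGetD_neg_one_append_singleton, List.append_assoc, List.append_assoc]
      congr 1
      simp only [List.cons_append, List.nil_append, List.map_cons, List.map_nil, List.cons.injEq,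
        and_true, true_and]
      have h1 : pvS n (j + 1 + 1) = pvS n (j + 1) + (n - (j + 1)) := rfl
      rw [h1]
      ring
  unfold pvBuildTurn
  rw [PySem.List.pyRange_neg_one, List.foldl_map]
  have hlen : (n - 1 - 0).toNat = m - 1 := by omega
  rw [hlen, aux (m - 1), show m - 1 + 1 = m by omega]

-- scan: first index where x < element
lemma pvScanGo_break (x : Int) :
    ∀ (li : List Int) (c : Int) (k : Nat), k < li.length →
      (∀ j, j < k → ¬ x < li[j]!) → x < li[k]! →
      pvScanGo x li c = c + k := by
  intro li
  induction li with
  | nil => intro c k hk; simp at hk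
  | cons t ts ih =>
    intro c k hk hge hlt
    cases k with
    | zero =>
      simp only [List.getElem!_cons_zero] at hlt
      simp [pvScanGo, hlt]
    | succ k =>
      have h0 : ¬ x < t := by
        have := hge 0 (by omega)
        simpa using this
      simp only [pvScanGo, if_neg h0]
      have := ih (c + 1) k (by simpa using hk)
        (fun j hj => by have := hge (j + 1) (by omega); simpa using this)
        (by simpa using hlt)
      rw [this]; push_cast; ring

-- direction of a cell i in segment k: the scan over turn_li of (i-1) returns k
lemma scan_seg (n : Int) (m : Nat) (hm : 1 ≤ m) (hn : n = (m : Int))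
    (k : Nat) (hk : k < m) (i : Int) (h1 : pvS n k < i) (h2 : i ≤ pvS n (k + 1)) :
    pvScanGo (i - 1) (pvBuildTurn n) 0 = (k : Int) := by
  rw [buildTurn_eq n m hm hn]
  have hlen : ((List.range m).map (fun k => pvS n (k + 1))).length = m := by simp
  have := pvScanGo_break (i - 1) ((List.range m).map (fun k => pvS n (k + 1))) 0 k
    (by omega)
    (fun j hj => by
      have hjm : j < m := by omega
      have hgetj : ((List.range m).map (fun k => pvS n (k + 1)))[j]! = pvS n (j + 1) := by
        rw [getElem!_pos _ j (by omega)]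
        simp
      rw [hgetj]
      have := pvS_mono n m hn (j + 1) k (by omega) (by omega)
      omega)
    (by
      have hget : ((List.range m).map (fun k => pvS n (k + 1)))[k]! = pvS n (k + 1) := by
        rw [getElem!_pos _ k (by omega)]
        simp
      rw [hget]; omega)
  rw [this]; ring

lemma mod3_mem (x : Int) : PySem.Int.mod x 3 = 0 ∨ PySem.Int.mod x 3 = 1 ∨ PySem.Int.mod x 3 = 2 := by
  rw [PySem.Int.mod_eq_emod_of_pos (by omega)]
  omega

-- A's three-if update equals pvMove, as the computed mod is always in {0,1,2}
lemma threeIf_eq_pvMove (md : Int) (r c : Int)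
    (h : md = 0 ∨ md = 1 ∨ md = 2) :
    (if md = 2 then ((if md = 0 then r + 1 else r) - 1, (if md = 1 then c + 1 else c) - 1)
     else (if md = 0 then r + 1 else r, if md = 1 then c + 1 else c)) = pvMove md (r, c) := by
  rcases h with h | h | h <;> subst h <;> simp [pvMove]

-- shift lemma: A's write-then-move fold over cells c..c+L equals (after the first write)
-- a move-then-write fold over cells c+1..c+L, with direction of cell i = Ad (i-1)
lemma shiftA (Ad : Int → Int) :
    ∀ (L : Nat) (c : Int) (g : List (List Int)) (r cc : Int),
      ((pvCells c (L + 1)).foldl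
        (fun (s : List (List Int) × Int × Int) i =>
          (pvWrite2 s.1 s.2.1 s.2.2 i, pvMove (Ad i) (s.2.1, s.2.2))) (g, r, cc)).1
      = ((pvCells (c + 1) L).foldl (pvStepM (fun i => Ad (i - 1)))
          (pvWrite2 g r cc c, r, cc)).1 := by
  intro L
  induction L with
  | zero => intro c g r cc; simp [pvCells]
  | succ L ih =>
    intro c g r cc
    rcases hmv : pvMove (Ad c) (r, cc) with ⟨r', cc'⟩
    have hA : pvCells c (L + 1 + 1) = c :: pvCells (c + 1) (L + 1) := rfl
    rw [hA, List.foldl_cons]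
    dsimp only
    rw [hmv, ih (c + 1) (pvWrite2 g r cc c) r' cc']
    have hrhs : pvStepM (fun i => Ad (i - 1)) (pvWrite2 g r cc c, r, cc) (c + 1)
        = (pvWrite2 (pvWrite2 g r cc c) r' cc' (c + 1), r', cc') := by
      simp only [pvStepM, show c + 1 - 1 = c from by ring, hmv]
    rw [show pvCells (c + 1) (L + 1) = (c + 1) :: pvCells (c + 1 + 1) L from rfl,
        List.foldl_cons, hrhs]

-- B's inner loop (dummy iteration with counter) as a move-then-write fold over cell values
lemma innerB (d : Int) :
    ∀ (l : List Int) (g : List (List Int)) (r c i0 : Int),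
      l.foldl (fun (s : List (List Int) × Int × Int × Int) _ =>
          (pvWrite2 s.1 (pvMove d (s.2.1, s.2.2.1)).1 (pvMove d (s.2.1, s.2.2.1)).2 (s.2.2.2 + 1),
            (pvMove d (s.2.1, s.2.2.1)).1, (pvMove d (s.2.1, s.2.2.1)).2, s.2.2.2 + 1)) (g, r, c, i0)
      = (let res := (pvCells (i0 + 1) l.length).foldl (pvStepM (fun _ => d)) (g, r, c)
         (res.1, res.2.1, res.2.2, i0 + l.length)) := by
  intro l
  induction l with
  | nil => intro g r c i0; simp [pvCells]
  | cons x xs ih =>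
    intro g r c i0
    simp only [List.foldl_cons, List.length_cons]
    rcases hmv : pvMove d (r, c) with ⟨r', c'⟩
    dsimp only
    rw [ih (pvWrite2 g r' c' (i0 + 1)) r' c' (i0 + 1)]
    simp only [pvCells, List.foldl_cons, pvStepM, hmv]
    have h4 : (i0 : Int) + ((xs.length : Nat) + 1 : Nat) = i0 + 1 + (xs.length : Int) := by
      push_cast; ring
    rw [h4]

lemma foldl_congr_cells {D1 D2 : Int → Int} {c : Int} {L : Nat}
    (h : ∀ i ∈ pvCells c L, D1 i = D2 i) (s : List (List Int) × Int × Int) :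
    (pvCells c L).foldl (pvStepM D1) s = (pvCells c L).foldl (pvStepM D2) s := by
  induction L generalizing c s with
  | zero => rfl
  | succ L ih =>
    simp only [pvCells, List.foldl_cons]
    rw [show pvStepM D1 s c = pvStepM D2 s c by
      simp only [pvStepM, h c (by simp [pvCells])]]
    exact ih (fun i hi => h i (by simp [pvCells]; right; exact hi)) _

-- B's outer loop over segments 0..j-1 equals the canonical move-then-write fold over cells 1..S j
lemma outerB (n : Int) (m : Nat) (hm : 1 ≤ m) (hn : n = (m : Int)) (ans0 : List (List Int)) :
    ∀ j : Nat, j ≤ m →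
      (PySem.List.pyRange 0 (j : Int) 1).foldl
        (fun (s : List (List Int) × Int × Int × Int) k =>
          (PySem.List.pyRange 0 (n - k) 1).foldl
            (fun (s : List (List Int) × Int × Int × Int) _ =>
              (pvWrite2 s.1 (pvMove (PySem.Int.mod k 3) (s.2.1, s.2.2.1)).1
                  (pvMove (PySem.Int.mod k 3) (s.2.1, s.2.2.1)).2 (s.2.2.2 + 1),
                (pvMove (PySem.Int.mod k 3) (s.2.1, s.2.2.1)).1,
                (pvMove (PySem.Int.mod k 3) (s.2.1, s.2.2.1)).2, s.2.2.2 + 1)) s) (ans0, -1, 0, 0)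
      = (let res := (pvCells 1 (pvSN m j)).foldl
            (pvStepM (fun i => PySem.Int.mod (pvScanGo (i - 1) (pvBuildTurn n) 0) 3)) (ans0, -1, 0)
         (res.1, res.2.1, res.2.2, ((pvSN m j : Nat) : Int))) := by
  intro j
  induction j with
  | zero =>
    intro _
    rw [show ((0 : Nat) : Int) = 0 from rfl, PySem.List.pyRange_one_eq_nil (by omega)]
    simp [pvSN, pvCells]
  | succ j ih =>
    intro hj
    rw [show ((j + 1 : Nat) : Int) = (j : Int) + 1 by push_cast; ring,
        PySem.List.pyRange_one_succ_right (by positivity), List.foldl_append, ih (by omega)]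
    rw [List.foldl_cons, List.foldl_nil]
    dsimp only
    rw [innerB (PySem.Int.mod (j : Int) 3)]
    have hlen : ((PySem.List.pyRange 0 (n - (j : Int)) 1).length : Nat) = m - j := by
      rw [PySem.List.length_pyRange_one]; omega
    rw [hlen]
    have hcast : ((pvSN m j : Nat) : Int) = pvS n j := by
      rw [hn]; exact pvSN_cast m j (by omega)
    have hdir : ∀ i ∈ pvCells (((pvSN m j : Nat) : Int) + 1) (m - j),
        (fun _ : Int => PySem.Int.mod (j : Int) 3) i
        = (fun i => PySem.Int.mod (pvScanGo (i - 1) (pvBuildTurn n) 0) 3) i := by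
      intro i hi
      dsimp only
      rw [mem_pvCells] at hi
      have h1 : pvS n j < i := by omega
      have h2 : i ≤ pvS n (j + 1) := by
        have hs : pvS n (j + 1) = pvS n j + (n - j) := rfl
        rw [hs]
        have : ((m - j : Nat) : Int) = n - j := by omega
        omega
      rw [scan_seg n m hm hn j (by omega) i h1 h2]
    rw [foldl_congr_cells hdir]
    have hmerge : pvCells 1 (pvSN m (j + 1))
        = pvCells 1 (pvSN m j) ++ pvCells (((pvSN m j : Nat) : Int) + 1) (m - j) := by
      rw [show pvSN m (j + 1) = pvSN m j + (m - j) from rfl, pvCells_append]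
      rw [show (1 : Int) + ((pvSN m j : Nat) : Int) = ((pvSN m j : Nat) : Int) + 1 by ring]
    rw [hmerge, List.foldl_append]
    have hcnt : ((pvSN m (j + 1) : Nat) : Int) = ((pvSN m j : Nat) : Int) + ((m - j : Nat) : Int) := by
      rw [show pvSN m (j + 1) = pvSN m j + (m - j) from rfl]
      push_cast
      ring
    rw [hcnt]

-- A's loop body (three independent ifs on mod) in canonical pvMove form
lemma bodyA_eq (tl : List Int) :
    (fun (s : List (List Int) × Int × Int) i =>
      ((pvWrite2 s.1 s.2.1 s.2.2 i,
        if PySem.Int.mod (pvScanGo i tl 0) 3 = 2 then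
          ((if PySem.Int.mod (pvScanGo i tl 0) 3 = 0 then s.2.1 + 1 else s.2.1) - 1,
            (if PySem.Int.mod (pvScanGo i tl 0) 3 = 1 then s.2.2 + 1 else s.2.2) - 1)
        else
          (if PySem.Int.mod (pvScanGo i tl 0) 3 = 0 then s.2.1 + 1 else s.2.1,
            if PySem.Int.mod (pvScanGo i tl 0) 3 = 1 then s.2.2 + 1 else s.2.2)) :
        List (List Int) × Int × Int))
    = (fun s i => (pvWrite2 s.1 s.2.1 s.2.2 i,
        pvMove (PySem.Int.mod (pvScanGo i tl 0) 3) (s.2.1, s.2.2))) := by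
  funext s i
  dsimp only
  rw [threeIf_eq_pvMove (PySem.Int.mod (pvScanGo i tl 0) 3) s.2.1 s.2.2
    (mod3_mem (pvScanGo i tl 0))]

-- ===== VERDICT (by name: the statement is the Claim_ definition above) =====
theorem solution_spec : Claim_equal_solution := by
  intro n _
  unfold Spec_solution
  by_cases hneg : n ≤ 0
  · have h1 : PySem.List.pyRange 1 (n + 1) 1 = [] := PySem.List.pyRange_one_eq_nil (by omega)
    have h2 : PySem.List.pyRange 0 n 1 = [] := PySem.List.pyRange_one_eq_nil (by omega)
    simp [solution, solution_alt, h1, h2]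
  · obtain ⟨m, hn⟩ : ∃ m : Nat, n = (m : Int) := ⟨n.toNat, by omega⟩
    subst hn
    have hm : 1 ≤ m := by omega
    have htot : (PySem.List.pyRange 1 ((m : Int) + 1) 1).foldl (· + ·) 0 = pvS (m : Int) m :=
      sum_pyRange m
    have hS1 : pvS (m : Int) 1 = (m : Int) := by simp [pvS]
    have htpos : 1 ≤ pvS (m : Int) m := by
      have := pvS_mono (m : Int) m rfl 1 m hm (le_refl m)
      rw [hS1] at this
      omega
    have hSN : ((pvSN m m : Nat) : Int) = pvS (m : Int) m := pvSN_cast m m (le_refl m)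
    have hSN1 : 1 ≤ pvSN m m := by omega
    simp only [solution, solution_alt]
    rw [bodyA_eq (pvBuildTurn (m : Int))]
    rw [htot]
    rw [pyRange_eq_pvCells 1 (pvS (m : Int) m + 1)]
    have hct : (pvS (m : Int) m + 1 - 1).toNat = (pvSN m m - 1) + 1 := by omega
    rw [hct]
    rw [shiftA (fun i => PySem.Int.mod (pvScanGo i (pvBuildTurn (m : Int)) 0) 3)
      (pvSN m m - 1) 1 _ 0 0]
    rw [outerB (m : Int) m hm rfl _ m (le_refl m)]
    dsimp only
    rw [show pvCells 1 (pvSN m m) = 1 :: pvCells (1 + 1) (pvSN m m - 1) by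
      rw [show pvSN m m = (pvSN m m - 1) + 1 by omega]
      rfl]
    rw [List.foldl_cons]
    have hfirst : pvStepM (fun i => PySem.Int.mod (pvScanGo (i - 1) (pvBuildTurn (m : Int)) 0) 3)
        ((PySem.List.pyRange 1 ((m : Int) + 1) 1).map (fun i => PySem.List.pyRepeat [0] i), -1, 0) 1
        = (pvWrite2 ((PySem.List.pyRange 1 ((m : Int) + 1) 1).map
            (fun i => PySem.List.pyRepeat [0] i)) 0 0 1, 0, 0) := by
      have hscan : pvScanGo ((1 : Int) - 1) (pvBuildTurn (m : Int)) 0 = ((0 : Nat) : Int) := by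
        apply scan_seg (m : Int) m hm rfl 0 (by omega) 1
        · simp [pvS]
        · rw [show pvS (m : Int) (0 + 1) = (m : Int) from by simp [pvS]]; omega
      simp only [pvStepM, hscan]
      rw [show PySem.Int.mod ((0 : Nat) : Int) 3 = 0 by
        rw [PySem.Int.mod_eq_emod_of_pos (by omega)]; rfl]
      simp [pvMove]
    rw [hfirst]
    rw [PySem.List.foldl_append_eq_flatMap]
    simp
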